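-- pv_equiv track=rewrite | github.com/dvdknaap/destinyVespersHostPuzzle | puzzle.py | find_two_digit_multiplication
-- ===== SOURCE A (Python) =====
-- import itertools
--
-- def find_unique_combination(target, operation='sum'):
--     """
--     Find a set of four unique digits between 1 and 9 that reach the target
--     using the specified operation ('sum' or 'multiply').
--     """
--     digits = range(1, 10)
--     # Generate all possible combinations of four unique digits
--     combinations = itertools.permutations(digits, 4)
--
--     # Find the correct combination based on the operation
--     for comb in combinations:
--         if operation == 'sum' and sum(comb) == target:
--             return comb
--         elif operation == 'multiply':
--             product = comb[0] * comb[1] * comb[2] * comb[3]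
--             if product == target:
--                 return comb
--
--     return None
--
-- def find_two_digit_multiplication(target):
--     """
--     Find two two-digit numbers whose product equals the target.
--     """
--     for i in range(10, 100):  # All possible two-digit numbers
--         for j in range(10, 100):
--             if i * j == target:
--                 # Find sets of four digits that sum up to these numbers.
--                 combination1 = find_unique_combination(i, operation='sum')
--                 combination2 = find_unique_combination(j, operation='sum')
--
--                 if combination1 and combination2:
--                     return i, j, combination1, combination2
--
--     return None
-- ===== SOURCE B (Python) =====
-- from itertools import combinations
--
-- def _first_sum_combination(s):
--     # Sums of four distinct digits 1..9 lie in [10, 30]; the lexicographically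
--     # first permutation with a given sum is its sorted (increasing) tuple, so
--     # scanning increasing combinations gives the same answer as scanning all
--     # permutations.
--     if not 10 <= s <= 30:
--         return None
--     for comb in combinations(range(1, 10), 4):
--         if sum(comb) == s:
--             return comb
--     return None
--
-- def find_two_digit_multiplication(target):
--     for i in range(10, 100):
--         if target % i != 0:
--             continue
--         j = target // i
--         if not 10 <= j < 100:
--             continue
--         c1 = _first_sum_combination(i)
--         c2 = _first_sum_combination(j)
--         if c1 and c2:
--             return i, j, c1, c2
--     return None
-- ===== Notes on version B (the rewrite author's own statement) =====
-- stated objective: alternative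
-- what changed: B replaces A's double loop over all two-digit pairs with a single divisor loop computing the cofactor by division, and replaces the scan of all four-digit permutations with a range guard plus a scan of the increasing combinations only (the lexicographically first permutation of a given sum is its sorted tuple).
import Mathlib
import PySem

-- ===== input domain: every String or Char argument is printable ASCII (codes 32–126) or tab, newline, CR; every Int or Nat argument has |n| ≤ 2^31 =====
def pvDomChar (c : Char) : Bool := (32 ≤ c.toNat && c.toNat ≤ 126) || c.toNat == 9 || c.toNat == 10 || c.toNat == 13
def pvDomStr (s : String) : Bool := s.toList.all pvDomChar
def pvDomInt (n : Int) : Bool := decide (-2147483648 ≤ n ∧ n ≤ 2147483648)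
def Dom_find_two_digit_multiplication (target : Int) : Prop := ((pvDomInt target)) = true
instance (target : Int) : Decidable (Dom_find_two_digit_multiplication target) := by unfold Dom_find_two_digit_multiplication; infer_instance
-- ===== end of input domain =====

-- B replaces A's double scan over two-digit pairs by a single divisor loop (j = target // i)
-- and scans the increasing digit combinations instead of all permutations: a different,
-- leaner algorithm with the same result (objective: alternative).

-- ===== PORT A =====
-- itertools.permutations(range(1, 10), 4)
def permList : List (List Int) := PySem.List.permutations (PySem.List.pyRange 1 10 1) 4

-- the 'for comb in combinations: if … return comb' loop of find_unique_combination
def fucLoop (target : Int) (operation : String) : List (List Int) → Option (List Int)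
  | [] => none
  | comb :: rest =>
    if operation == "sum" && comb.sum == target then some comb
    else if operation == "multiply" then
      if PySem.List.pyGetD comb 0 0 * PySem.List.pyGetD comb 1 0 *
          PySem.List.pyGetD comb 2 0 * PySem.List.pyGetD comb 3 0 == target then some comb
      else fucLoop target operation rest
    else fucLoop target operation rest

def find_unique_combination (target : Int) (operation : String) : Option (List Int) :=
  fucLoop target operation permList

-- inner 'for j in range(10, 100)' loop of A
def innerA (target i : Int) : List Int → Option (Int × Int × List Int × List Int)
  | [] => none
  | j :: rest =>
    if i * j == target then
      match find_unique_combination i "sum", find_unique_combination j "sum" with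
      | some c1, some c2 => some (i, j, c1, c2)
      | _, _ => innerA target i rest
    else innerA target i rest

-- outer 'for i in range(10, 100)' loop of A
def outerA (target : Int) : List Int → Option (Int × Int × List Int × List Int)
  | [] => none
  | i :: rest =>
    match innerA target i (PySem.List.pyRange 10 100 1) with
    | some r => some r
    | none => outerA target rest

def find_two_digit_multiplication (target : Int) : Option (Int × Int × List Int × List Int) :=
  outerA target (PySem.List.pyRange 10 100 1)

-- ===== PORT B =====
-- itertools.combinations(range(1, 10), 4): lexicographic increasing 4-tuples
def combos4 : List (List Int) :=
  (PySem.List.pyRange 1 10 1).flatMap (fun a =>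
    (PySem.List.pyRange (a+1) 10 1).flatMap (fun b =>
      (PySem.List.pyRange (b+1) 10 1).flatMap (fun c =>
        (PySem.List.pyRange (c+1) 10 1).map (fun d => [a, b, c, d]))))

def firstSumCombination (s : Int) : Option (List Int) :=
  if 10 ≤ s ∧ s ≤ 30 then combos4.find? (fun c => c.sum == s) else none

-- single 'for i in range(10, 100)' divisor loop of B
def altLoop (target : Int) : List Int → Option (Int × Int × List Int × List Int)
  | [] => none
  | i :: rest =>
    if PySem.Int.mod target i ≠ 0 then altLoop target rest
    else
      if 10 ≤ PySem.Int.floordiv target i ∧ PySem.Int.floordiv target i < 100 then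
        match firstSumCombination i, firstSumCombination (PySem.Int.floordiv target i) with
        | some c1, some c2 => some (i, PySem.Int.floordiv target i, c1, c2)
        | _, _ => altLoop target rest
      else altLoop target rest

def find_two_digit_multiplication_alt (target : Int) : Option (Int × Int × List Int × List Int) :=
  altLoop target (PySem.List.pyRange 10 100 1)

-- ===== PRECONDITION & SPEC =====
def Spec_find_two_digit_multiplication (target : Int) (out : Option (Int × Int × List Int × List Int)) : Prop := out = find_two_digit_multiplication_alt target
instance (target : Int) (out : Option (Int × Int × List Int × List Int)) : Decidable (Spec_find_two_digit_multiplication target out) := by unfold Spec_find_two_digit_multiplication; infer_instance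

-- ===== CLAIM (what is proved, stated in full; the proofs are below) =====
def Claim_equal_find_two_digit_multiplication : Prop := ∀ (target : Int), Dom_find_two_digit_multiplication target → Spec_find_two_digit_multiplication target (find_two_digit_multiplication target)

-- ===== LEMMAS AND PROOFS =====

-- every 4-permutation of the digits 1..9 sums to a value in [10, 30]
set_option maxRecDepth 8000 in
set_option maxHeartbeats 2000000 in
lemma perm_sums : permList.all (fun c => decide (10 ≤ c.sum ∧ c.sum ≤ 30)) = true := by decide

-- the two helpers agree on every sum in [10, 30] (finite check)
set_option maxRecDepth 8000 in
set_option maxHeartbeats 2000000 in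
lemma helper_eq_range : (PySem.List.pyRange 10 31 1).all
    (fun s => find_unique_combination s "sum" == firstSumCombination s) = true := by decide

lemma fucLoop_none (s : Int) (l : List (List Int)) (h : ∀ c ∈ l, c.sum ≠ s) :
    fucLoop s "sum" l = none := by
  induction l with
  | nil => rfl
  | cons c rest ih =>
    have hc : c.sum ≠ s := h c (by simp)
    simp only [fucLoop]
    rw [if_neg (by simp [hc]), if_neg (by decide)]
    exact ih (fun x hx => h x (by simp [hx]))

lemma helper_eq (s : Int) : find_unique_combination s "sum" = firstSumCombination s := by
  by_cases hs : 10 ≤ s ∧ s ≤ 30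
  · have hmem : s ∈ PySem.List.pyRange 10 31 1 := by
      rw [PySem.List.mem_pyRange_one]; omega
    have := List.all_eq_true.mp helper_eq_range s hmem
    exact beq_iff_eq.mp this
  · rw [firstSumCombination, if_neg hs]
    apply fucLoop_none
    intro c hc
    have := List.all_eq_true.mp perm_sums c hc
    have hb := of_decide_eq_true this
    omega

lemma innerA_none (target i : Int) (l : List Int) (h : ∀ j ∈ l, i * j ≠ target) :
    innerA target i l = none := by
  induction l with
  | nil => rfl
  | cons j rest ih =>
    have hj : i * j ≠ target := h j (by simp)
    simp only [innerA]
    rw [if_neg (by simp [hj])]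
    exact ih (fun x hx => h x (by simp [hx]))

lemma innerA_append (target i : Int) (l1 l2 : List Int) (h : ∀ j ∈ l1, i * j ≠ target) :
    innerA target i (l1 ++ l2) = innerA target i l2 := by
  induction l1 with
  | nil => rfl
  | cons j rest ih =>
    have hj : i * j ≠ target := h j (by simp)
    simp only [List.cons_append, innerA]
    rw [if_neg (by simp [hj])]
    exact ih (fun x hx => h x (by simp [hx]))

-- the inner 10..99 scan of A finds only j = target // i, exactly when i divides target
lemma inner_eq (target i : Int) (hi : 0 < i) :
    innerA target i (PySem.List.pyRange 10 100 1) =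
      if PySem.Int.mod target i ≠ 0 then none
      else if 10 ≤ PySem.Int.floordiv target i ∧ PySem.Int.floordiv target i < 100 then
        match find_unique_combination i "sum",
              find_unique_combination (PySem.Int.floordiv target i) "sum" with
        | some c1, some c2 => some (i, PySem.Int.floordiv target i, c1, c2)
        | _, _ => none
      else none := by
  by_cases hm : PySem.Int.mod target i = 0
  · have hdvd : i ∣ target := (PySem.Int.mod_eq_zero_iff_dvd target i).mp hm
    set j := PySem.Int.floordiv target i with hjdef
    have hj : i * j = target := by
      rw [hjdef, PySem.Int.floordiv_eq_ediv_of_pos hi]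
      exact Int.mul_ediv_cancel' hdvd
    have huniq : ∀ x : Int, i * x = target → x = j := by
      intro x hx
      have : i * x = i * j := by rw [hx, hj]
      exact mul_left_cancel₀ (ne_of_gt hi) this
    rw [if_neg (by simp [hm])]
    by_cases hr : 10 ≤ j ∧ j < 100
    · rw [if_pos hr]
      rw [PySem.List.pyRange_one_append 10 j 100 (by omega) (by omega)]
      rw [innerA_append _ _ _ _ (by
        intro x hx
        rw [PySem.List.mem_pyRange_one] at hx
        intro hc
        have := huniq x hc
        omega)]
      rw [PySem.List.pyRange_one_cons (by omega)]
      simp only [innerA]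
      rw [if_pos (by simp [hj])]
      have hrest : innerA target i (PySem.List.pyRange (j + 1) 100 1) = none := by
        apply innerA_none
        intro x hx
        rw [PySem.List.mem_pyRange_one] at hx
        intro hc
        have := huniq x hc
        omega
      cases find_unique_combination i "sum" <;>
        cases find_unique_combination j "sum" <;> simp [hrest]
    · rw [if_neg hr]
      apply innerA_none
      intro x hx
      rw [PySem.List.mem_pyRange_one] at hx
      intro hc
      have := huniq x hc
      omega
  · rw [if_pos (by simp [hm])]
    apply innerA_none
    intro x hx hc
    exact hm ((PySem.Int.mod_eq_zero_iff_dvd target i).mpr ⟨x, hc.symm⟩)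

lemma altLoop_step (target i : Int) (rest : List Int) :
    altLoop target (i :: rest) =
      match (if PySem.Int.mod target i ≠ 0 then none
        else if 10 ≤ PySem.Int.floordiv target i ∧ PySem.Int.floordiv target i < 100 then
          match firstSumCombination i, firstSumCombination (PySem.Int.floordiv target i) with
          | some c1, some c2 => some (i, PySem.Int.floordiv target i, c1, c2)
          | _, _ => none
        else none : Option (Int × Int × List Int × List Int)) with
      | some r => some r
      | none => altLoop target rest := by
  simp only [altLoop]
  split_ifs <;>
    first
      | rfl
      | (cases firstSumCombination i <;>
          cases firstSumCombination (PySem.Int.floordiv target i) <;> rfl)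

lemma loops_eq (target : Int) (l : List Int) (h : ∀ i ∈ l, 0 < i) :
    outerA target l = altLoop target l := by
  induction l with
  | nil => rfl
  | cons i rest ih =>
    have hi : 0 < i := h i (by simp)
    rw [altLoop_step]
    simp only [outerA]
    rw [inner_eq target i hi, helper_eq, helper_eq]
    have ih' := ih (fun x hx => h x (by simp [hx]))
    split <;> simp_all

-- ===== VERDICT (by name: the statement is the Claim_ definition above) =====
theorem find_two_digit_multiplication_spec : Claim_equal_find_two_digit_multiplication := by
  intro target _
  unfold Spec_find_two_digit_multiplication find_two_digit_multiplication
    find_two_digit_multiplication_alt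
  apply loops_eq
  intro i hi
  rw [PySem.List.mem_pyRange_one] at hi
  omega
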